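-- pv_equiv track=rewrite | github.com/andriymurovanyi/AP-lab_works | Lab_work_10/Task2(usl).py | rec_decompose
-- ===== SOURCE A (Python) =====
-- def rec_decompose(c):
--     def func(c, id):
--         """
--         Функция подсчета представлений числа.
--
--         Рекурсивный вариант.
--         :param c: Натуральное целое число.
--         :return: Количетво разложений числа.
--         """
--         if c == 0 and id == 0:
--             return 1
--         if c <= 0 or id <= 0:
--             return 0
--         return func(c - id, id) + func(c - 1, id - 1)
--     stack = []
--     if c == 0 or c == 1:
--         return 0
--     for i in range(1, c):
--         stack.append(func(c, i))
--     return max(stack)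
-- ===== SOURCE B (Python) =====
-- def rec_decompose(c):
--     if c == 0 or c == 1:
--         return 0
--     m = c - 1
--     # rows[n][k] = number of decompositions counted by A's func(n, k), built bottom-up
--     rows = [[1] + [0] * m]
--     for n in range(1, c + 1):
--         prev = rows[n - 1]
--         row = [0] * (m + 1)
--         for k in range(1, m + 1):
--             row[k] = (rows[n - k][k] if n >= k else 0) + prev[k - 1]
--         rows.append(row)
--     return max(rows[c][1:])
-- ===== Notes on version B (the rewrite author's own statement) =====
-- stated objective: faster
-- what changed: Replaced the exponential two-branch recursion by a bottom-up DP table rows[n][k] filled once, then max of the last row.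
import Mathlib
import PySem

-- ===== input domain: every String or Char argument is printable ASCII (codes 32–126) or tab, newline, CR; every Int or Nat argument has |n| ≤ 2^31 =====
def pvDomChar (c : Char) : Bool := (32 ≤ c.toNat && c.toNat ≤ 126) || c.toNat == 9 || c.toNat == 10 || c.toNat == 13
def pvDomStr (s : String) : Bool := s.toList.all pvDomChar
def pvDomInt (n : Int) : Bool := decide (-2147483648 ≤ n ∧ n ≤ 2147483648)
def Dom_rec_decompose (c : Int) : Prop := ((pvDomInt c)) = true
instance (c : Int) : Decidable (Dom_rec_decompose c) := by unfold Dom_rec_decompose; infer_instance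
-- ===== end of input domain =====

-- B replaces A's exponential two-branch recursion by a bottom-up O(c^2) DP table; equal return values proved for all c ≥ 0.

-- ===== PORT A =====
-- inner recursive func(c, id) of A
def funcA (c id : Int) : Int :=
  if c = 0 ∧ id = 0 then 1
  else if c ≤ 0 ∨ id ≤ 0 then 0
  else funcA (c - id) id + funcA (c - 1) (id - 1)
termination_by (c + id).toNat
decreasing_by all_goals omega

def rec_decompose (c : Int) : Int :=
  if c = 0 ∨ c = 1 then 0
  else (PySem.List.max? ((PySem.List.pyRange 1 c 1).map (funcA c)) (fun x => x)).getD 0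

-- ===== PORT B =====
-- row n of the DP table (inner `for k` loop of Source B); rows has the rows 0..n-1
def bRow (rows : List (List Int)) (n m : Nat) : List Int :=
  (List.range (m + 1)).map (fun k =>
    if k = 0 then 0
    else (if k ≤ n then ((rows.getD (n - k) []).getD k 0) else 0)
         + ((rows.getD (n - 1) []).getD (k - 1) 0))

-- the outer `for n` loop of Source B, building rows 0..N
def bRows (m : Nat) : Nat → List (List Int)
  | 0 => [1 :: List.replicate m 0]
  | n + 1 => bRows m n ++ [bRow (bRows m n) (n + 1) m]

def rec_decompose_alt (c : Int) : Int :=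
  if c = 0 ∨ c = 1 then 0
  else
    let m := (c - 1).toNat
    let rows := bRows m c.toNat
    (PySem.List.max? (((rows.getD c.toNat []).drop 1)) (fun x => x)).getD 0

-- ===== PRECONDITION & SPEC =====
-- Pre_ excludes only negative c, where both Pythons raise (A: ValueError on max of an empty list).
def Pre_rec_decompose (c : Int) : Prop := 0 ≤ c
instance (c : Int) : Decidable (Pre_rec_decompose c) := by unfold Pre_rec_decompose; infer_instance
def pvWitness_rec_decompose : Int := 5

def Spec_rec_decompose (c : Int) (out : Int) : Prop := out = rec_decompose_alt c
instance (c : Int) (out : Int) : Decidable (Spec_rec_decompose c out) := by unfold Spec_rec_decompose; infer_instance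

-- ===== CLAIM (what is proved, stated in full; the proofs are below) =====
def Claim_equal_rec_decompose : Prop := ∀ (c : Int), Dom_rec_decompose c → Pre_rec_decompose c → Spec_rec_decompose c (rec_decompose c)

-- ===== LEMMAS AND PROOFS =====

lemma funcA_neg (c id : Int) (h : c < 0) : funcA c id = 0 := by
  rw [funcA, if_neg (by omega), if_pos (by omega)]

lemma bRows_length (m N : Nat) : (bRows m N).length = N + 1 := by
  induction N with
  | zero => rfl
  | succ n ih => simp [bRows, ih]

lemma bRows_entry (m N : Nat) : ∀ n k, n ≤ N → k ≤ m →
    ((bRows m N).getD n []).getD k 0 = funcA n k := by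
  induction N with
  | zero =>
    intro n k hn hk
    interval_cases n
    cases k with
    | zero => simp [bRows, funcA]
    | succ j =>
      have h1 : ((1 : Int) :: List.replicate m 0).getD (j + 1) 0 = 0 := by
        rw [List.getD_cons_succ]
        rcases Nat.lt_or_ge j m with h | h
        · rw [List.getD_eq_getElem _ _ (by simpa using h)]; simp
        · rw [List.getD_eq_default _ _ (by simpa using h)]
      rw [show (bRows m 0).getD 0 [] = (1 : Int) :: List.replicate m 0 from rfl, h1, funcA]
      split_ifs with hA hB
      · exfalso; omega
      · rfl
      · exfalso; omega
  | succ N ih =>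
    intro n k hn hk
    rcases Nat.lt_or_ge n (N + 1) with h | h
    · -- index into the old prefix
      have hlen : n < (bRows m N).length := by rw [bRows_length]; omega
      have : (bRows m (N + 1)).getD n [] = (bRows m N).getD n [] := by
        simp only [bRows, List.getD, List.getElem?_append_left hlen]
      rw [this]
      exact ih n k (by omega) hk
    · -- n = N + 1 : the freshly appended row
      have hn' : n = N + 1 := by omega
      subst hn'
      have hrow : (bRows m (N + 1)).getD (N + 1) [] = bRow (bRows m N) (N + 1) m := by
        have hl := bRows_length m N
        simp only [bRows, List.getD]
        rw [show N + 1 = (bRows m N).length from hl.symm, List.getElem?_concat_length]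
        rfl
      rw [hrow]
      have hk' : k < m + 1 := by omega
      have : (bRow (bRows m N) (N + 1) m).getD k 0 =
          (if k = 0 then 0
           else (if k ≤ N + 1 then (((bRows m N).getD (N + 1 - k) []).getD k 0) else 0)
                + (((bRows m N).getD (N + 1 - 1) []).getD (k - 1) 0)) := by
        unfold bRow
        rw [List.getD, List.getElem?_map, List.getElem?_range hk']
        rfl
      rw [this]
      by_cases hk0 : k = 0
      · subst hk0
        rw [if_pos rfl, funcA]
        simp
        omega
      · rw [if_neg hk0]
        have hk1 : 1 ≤ k := Nat.one_le_iff_ne_zero.mpr hk0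
        rw [ih (N + 1 - 1) (k - 1) (by omega) (by omega)]
        rw [show ((N + 1 - 1 : Nat) : Int) = (N : Int) + 1 - 1 by omega]
        rw [show ((k - 1 : Nat) : Int) = (k : Int) - 1 by omega]
        have hfa : funcA ((N : Int) + 1) k =
            funcA ((N : Int) + 1 - k) k + funcA ((N : Int) + 1 - 1) (k - 1) := by
          rw [funcA]
          split_ifs with hA hB
          · exfalso; omega
          · exfalso; omega
          · rfl
        rw [show ((N + 1 : Nat) : Int) = (N : Int) + 1 by push_cast; ring]
        rw [hfa]
        congr 1
        by_cases hkn : k ≤ N + 1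
        · rw [if_pos hkn, ih (N + 1 - k) k (by omega) hk]
          rw [show ((N + 1 - k : Nat) : Int) = (N : Int) + 1 - k by omega]
        · rw [if_neg hkn, funcA_neg _ _ (by omega)]

lemma lists_eq (c : Int) (hc : 2 ≤ c) :
    (PySem.List.pyRange 1 c 1).map (funcA c)
      = ((bRows (c - 1).toNat c.toNat).getD c.toNat []).drop 1 := by
  set m := (c - 1).toNat with hm
  obtain ⟨n, hn⟩ : ∃ n, c.toNat = n + 1 := ⟨c.toNat - 1, by omega⟩
  have hrow : (bRows m c.toNat).getD c.toNat [] = bRow (bRows m n) (n + 1) m := by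
    rw [hn]
    have hl := bRows_length m n
    simp only [bRows, List.getD]
    rw [show n + 1 = (bRows m n).length from hl.symm, List.getElem?_concat_length]
    rfl
  rw [hrow]
  have hrowlen : (bRow (bRows m n) (n + 1) m).length = m + 1 := by
    unfold bRow; simp
  apply List.ext_getElem
  · rw [List.length_map, PySem.List.length_pyRange_one, List.length_drop, hrowlen]
    omega
  · intro i h1 h2
    have him : i < m := by
      have := h2; rw [List.length_drop, hrowlen] at this; omega
    -- left side
    rw [List.getElem_map, PySem.List.getElem_pyRange_one]
    -- right side
    rw [List.getElem_drop]
    have hentry : ((bRows m c.toNat).getD c.toNat []).getD (i + 1) 0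
        = funcA (c.toNat : Int) ((i + 1 : Nat) : Int) :=
      bRows_entry m c.toNat c.toNat (i + 1) (le_refl _) (by omega)
    rw [hrow] at hentry
    have hgd : (bRow (bRows m n) (n + 1) m)[1 + i] = (bRow (bRows m n) (n + 1) m).getD (i + 1) 0 := by
      rw [List.getD_eq_getElem _ _ (by omega)]
      congr 1
      omega
    rw [hgd, hentry]
    congr 1 <;> push_cast <;> omega

-- ===== VERDICT (by name: the statement is the Claim_ definition above) =====
theorem rec_decompose_spec : Claim_equal_rec_decompose := by
  intro c _ hpre
  unfold Spec_rec_decompose rec_decompose rec_decompose_alt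
  by_cases h01 : c = 0 ∨ c = 1
  · rw [if_pos h01, if_pos h01]
  · rw [if_neg h01, if_neg h01]
    have hc : 2 ≤ c := by unfold Pre_rec_decompose at hpre; omega
    rw [lists_eq c hc]
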